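-- pv_equiv track=rewrite | github.com/Aquaveo/tethysapp-tethys_app_store | tethysapp/app_store/resource_helpers.py | get_app_channel_for_stores
-- ===== SOURCE A (Python) =====
-- def get_app_channel_for_stores(stores):
--     """Parses a dictionary of resources based on conda channels and provides a summary of apps shared across channels
--
--     Args:
--         stores (dict): Dictionary of apps based on conda channels
--
--     Returns:
--         dict: Summary of apps and channels based on status, i.e. availableApps, installedApps, and incompatibleApps.
--         See the example below
--
--         {
--             'availableApps': {'app1_name': ['conda_channel1', 'conda_channel2'], 'app2_name': ['conda_channel1']},
--             'installedApps': {'app1_name': ['conda_channel1']},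
--             'incompatibleApps': {'app3_name': ['conda_channel1', 'conda_channel2']}
--         }
--     """
--     app_channel_obj = {}
--     for channel in stores:
--         for type_apps in stores[channel]:
--             if type_apps not in app_channel_obj:
--                 app_channel_obj[type_apps] = {}
--             for app in stores[channel][type_apps]:
--                 if app not in app_channel_obj[type_apps]:
--                     app_channel_obj[type_apps][app] = []
--                     app_channel_obj[type_apps][app].append(channel)
--                 else:
--                     if channel not in app_channel_obj[type_apps][app]:
--                         app_channel_obj[type_apps][app].append(channel)
--     return app_channel_obj
-- ===== SOURCE B (Python) =====
-- def get_app_channel_for_stores(stores):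
--     # Two-pass index-then-scan: first collect the ordered distinct status keys and,
--     # per status, the apps in order of first appearance; then compute each app's
--     # channel list with a single comprehension over stores.
--     apps_by_status = {}
--     for channel_apps in stores.values():
--         for status, apps in channel_apps.items():
--             bucket = apps_by_status.setdefault(status, [])
--             for app in apps:
--                 if app not in bucket:
--                     bucket.append(app)
--     return {
--         status: {
--             app: [ch for ch in stores if app in stores[ch].get(status, {})]
--             for app in bucket
--         }
--         for status, bucket in apps_by_status.items()
--     }
-- ===== Notes on version B (the rewrite author's own statement) =====
-- stated objective: alternative
-- what changed: Replaces A's single incremental three-level dict build with a two-phase index-then-scan: phase 1 registers status keys and the ordered distinct apps per status, phase 2 computes each app's channel list by one comprehension scan of stores per (status, app). Pre_ only excludes association lists with duplicate channel or status keys, which do not represent any Python dict input.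
import Mathlib
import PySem

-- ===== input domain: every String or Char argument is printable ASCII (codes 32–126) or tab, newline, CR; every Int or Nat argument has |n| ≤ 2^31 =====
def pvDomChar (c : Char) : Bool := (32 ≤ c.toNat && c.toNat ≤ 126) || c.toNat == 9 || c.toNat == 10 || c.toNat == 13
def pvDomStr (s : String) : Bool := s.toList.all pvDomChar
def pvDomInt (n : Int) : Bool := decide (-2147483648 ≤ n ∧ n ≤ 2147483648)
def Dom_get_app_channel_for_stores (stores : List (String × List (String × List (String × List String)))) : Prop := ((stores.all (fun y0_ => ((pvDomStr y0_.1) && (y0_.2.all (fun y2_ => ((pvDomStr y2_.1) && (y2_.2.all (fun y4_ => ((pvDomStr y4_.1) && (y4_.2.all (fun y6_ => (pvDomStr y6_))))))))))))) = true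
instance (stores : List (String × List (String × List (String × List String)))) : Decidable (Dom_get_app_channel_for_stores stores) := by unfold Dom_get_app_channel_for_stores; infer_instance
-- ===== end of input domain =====

-- B replaces A's single incremental three-level build with a two-phase index-then-scan
-- (collect status keys and ordered distinct apps first, then one scan of stores per
-- (status, app) for its channel list); equal output proved on dict-shaped inputs.

-- shared association-list primitives (Python dict lookup / in-place value update)
def pvLookup {β : Type} (l : List (String × β)) (k : String) : Option β :=
  match l with
  | [] => none
  | (k', v) :: t => if k' = k then some v else pvLookup t k

def pvModify {β : Type} (l : List (String × β)) (k : String) (f : β → β) : List (String × β) :=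
  match l with
  | [] => []
  | (k', v) :: t => if k' = k then (k', f v) :: t else (k', v) :: pvModify t k f

-- ===== PORT A =====
-- 'if app not in obj[type_apps]: obj[type_apps][app] = [channel]  else: append channel if absent'
def pvAStepApp (channel app : String) (inner : List (String × List String)) : List (String × List String) :=
  if (pvLookup inner app).isSome = false then
    inner ++ [(app, [channel])]
  else
    pvModify inner app (fun chs => if channel ∈ chs then chs else chs ++ [channel])

-- body of A's middle loop: register type_apps, then the inner 'for app in …' loop
def pvAStepType (channel : String) (obj : List (String × List (String × List String)))
    (typeApps : String) (apps : List (String × List String)) :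
    List (String × List (String × List String)) :=
  let obj1 := if (pvLookup obj typeApps).isSome = false then obj ++ [(typeApps, [])] else obj
  apps.foldl (fun o ap => pvModify o typeApps (pvAStepApp channel ap.1)) obj1

def get_app_channel_for_stores (stores : List (String × List (String × List (String × List String)))) : List (String × List (String × List String)) :=
  stores.foldl (fun obj ct => ct.2.foldl (fun o ta => pvAStepType ct.1 o ta.1 ta.2) obj) []

-- ===== PORT B =====
-- phase 1: register the status key, then merge this channel's apps (ordered, distinct)
def pvCollectStatus (ix : List (String × List String)) (ta : String × List (String × List String)) : List (String × List String) :=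
  let ix1 := if (pvLookup ix ta.1).isSome = false then ix ++ [(ta.1, [])] else ix
  ta.2.foldl (fun j ap => pvModify j ta.1 (fun l => if ap.1 ∈ l then l else l ++ [ap.1])) ix1

-- phase 2: '[ch for ch in stores if app in stores[ch].get(status, {})]'
def pvChannelsFor (stores : List (String × List (String × List (String × List String)))) (status app : String) : List String :=
  (stores.filter (fun ct =>
    match pvLookup ct.2 status with
    | some apps => (pvLookup apps app).isSome
    | none => false)).map (fun ct => ct.1)

def get_app_channel_for_stores_alt (stores : List (String × List (String × List (String × List String)))) : List (String × List (String × List String)) :=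
  let ix := stores.foldl (fun j ct => ct.2.foldl pvCollectStatus j) []
  ix.map (fun sa => (sa.1, sa.2.map (fun a => (a, pvChannelsFor stores sa.1 a))))

-- ===== PRECONDITION & SPEC =====
-- Pre_ excludes association lists with duplicate channel keys or duplicate status keys
-- inside one channel: those do not represent any Python dict (dict keys are unique).
def Pre_get_app_channel_for_stores (stores : List (String × List (String × List (String × List String)))) : Prop :=
  (stores.map (fun ct => ct.1)).Nodup ∧ ∀ ct ∈ stores, (ct.2.map (fun ta => ta.1)).Nodup
instance (stores : List (String × List (String × List (String × List String)))) : Decidable (Pre_get_app_channel_for_stores stores) := by unfold Pre_get_app_channel_for_stores; infer_instance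

def pvWitness_get_app_channel_for_stores : (List (String × List (String × List (String × List String)))) :=
  [("conda_channel1", [("availableApps", [("app1", ["meta"])]), ("installedApps", [])]),
   ("conda_channel2", [("availableApps", [("app1", []), ("app2", [])])])]

def Spec_get_app_channel_for_stores (stores : List (String × List (String × List (String × List String)))) (out : List (String × List (String × List String))) : Prop := out = get_app_channel_for_stores_alt stores
instance (stores : List (String × List (String × List (String × List String)))) (out : List (String × List (String × List String))) : Decidable (Spec_get_app_channel_for_stores stores out) := by unfold Spec_get_app_channel_for_stores; infer_instance

-- ===== CLAIM (what is proved, stated in full; the proofs are below) =====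
def Claim_equal_get_app_channel_for_stores : Prop := ∀ (stores : List (String × List (String × List (String × List String)))), Dom_get_app_channel_for_stores stores → Pre_get_app_channel_for_stores stores → Spec_get_app_channel_for_stores stores (get_app_channel_for_stores stores)

-- ===== LEMMAS AND PROOFS =====

-- B's result written as 'index decorated by a channel function'
def mkObj (g : String → String → List String) (ix : List (String × List String)) :
    List (String × List (String × List String)) :=
  ix.map (fun sa => (sa.1, sa.2.map (fun a => (a, g sa.1 a))))

def idxOf (stores : List (String × List (String × List (String × List String)))) : List (String × List String) :=
  stores.foldl (fun j ct => ct.2.foldl pvCollectStatus j) []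

def ixGet (ix : List (String × List String)) (t : String) : List String := (pvLookup ix t).getD []

-- the per-channel 'hit' tests
def pvHit (L : List (String × List (String × List String))) (s x : String) : Bool :=
  L.any (fun ta => ta.1 = s ∧ ∃ ap ∈ ta.2, ap.1 = x)

def pvHitC (tmap : List (String × List (String × List String))) (s x : String) : Bool :=
  match pvLookup tmap s with
  | some apps => (pvLookup apps x).isSome
  | none => false

-- invariants on the index
def GoodIx (ix : List (String × List String)) : Prop :=
  (ix.map (fun sa => sa.1)).Nodup ∧ ∀ sa ∈ ix, sa.2.Nodup

def Fresh (g : String → String → List String) (ix : List (String × List String)) : Prop :=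
  ∀ t a, a ∉ ixGet ix t → g t a = []

theorem pvLookup_isSome {β : Type} (l : List (String × β)) (k : String) :
    (pvLookup l k).isSome = true ↔ k ∈ l.map (fun p => p.1) := by
  induction l with
  | nil => simp [pvLookup]
  | cons h t ih =>
    obtain ⟨k', v⟩ := h
    by_cases hk : k' = k <;> simp [pvLookup, hk, ih]
    exact fun h => (hk h.symm).elim

theorem pvLookup_map_fst {β : Type} (l : List String) (h : String → β) (a : String) :
    pvLookup (l.map (fun x => (x, h x))) a = if a ∈ l then some (h a) else none := by
  induction l with
  | nil => simp [pvLookup]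
  | cons x t ih =>
    by_cases hx : x = a
    · simp [pvLookup, hx]
    · simp [pvLookup, hx, ih, Ne.symm hx]

theorem pvModify_map_fst {β : Type} (l : List String) (h : String → β) (a : String)
    (F : β → β) (hnd : l.Nodup) :
    pvModify (l.map (fun x => (x, h x))) a F
      = l.map (fun x => (x, if x = a then F (h a) else h x)) := by
  induction l with
  | nil => simp [pvModify]
  | cons x t ih =>
    simp only [List.nodup_cons] at hnd
    by_cases hx : x = a
    · subst hx
      simp only [List.map_cons, pvModify, if_pos]
      congr 1
      apply List.map_congr_left
      intro y hy
      have : y ≠ x := fun he => hnd.1 (he ▸ hy)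
      simp [this]
    · simp [pvModify, hx, ih hnd.2]

theorem pvModify_keys {β : Type} (l : List (String × β)) (k : String) (f : β → β) :
    (pvModify l k f).map (fun p => p.1) = l.map (fun p => p.1) := by
  induction l with
  | nil => rfl
  | cons h t ih =>
    obtain ⟨k', v⟩ := h
    by_cases hk : k' = k <;> simp [pvModify, hk, ih]

theorem pvModify_mem {β : Type} (l : List (String × β)) (k : String) (f : β → β)
    (sa : String × β) (hm : sa ∈ pvModify l k f) :
    sa ∈ l ∨ ∃ v, (k, v) ∈ l ∧ sa = (k, f v) := by
  induction l with
  | nil => simp [pvModify] at hm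
  | cons hd t ih =>
    obtain ⟨k', v⟩ := hd
    by_cases hk : k' = k
    · subst hk
      rw [pvModify, if_pos rfl] at hm
      rcases List.mem_cons.mp hm with h1 | h1
      · exact Or.inr ⟨v, by simp, h1⟩
      · exact Or.inl (List.mem_cons_of_mem _ h1)
    · rw [pvModify, if_neg hk] at hm
      rcases List.mem_cons.mp hm with h1 | h1
      · exact Or.inl (by simp [h1])
      · rcases ih h1 with h' | ⟨w, hw, he⟩
        · exact Or.inl (List.mem_cons_of_mem _ h')
        · exact Or.inr ⟨w, List.mem_cons_of_mem _ hw, he⟩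

theorem pvLookup_modify_other {β : Type} (l : List (String × β)) (k k' : String) (f : β → β)
    (h : k' ≠ k) : pvLookup (pvModify l k f) k' = pvLookup l k' := by
  induction l with
  | nil => rfl
  | cons hd t ih =>
    obtain ⟨k0, v⟩ := hd
    by_cases hk : k0 = k
    · subst hk
      have h2 : ¬ (k0 = k') := fun he => h (he ▸ rfl)
      rw [pvModify, if_pos rfl, pvLookup, if_neg h2, pvLookup, if_neg h2]
    · by_cases hk' : k0 = k' <;>
        rw [pvModify, if_neg hk] <;> simp [pvLookup, hk', ih]

theorem pvLookup_append_right {β : Type} (l : List (String × β)) (k : String) (v : β)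
    (h : (pvLookup l k).isSome = false) : pvLookup (l ++ [(k, v)]) k = some v := by
  induction l with
  | nil => simp [pvLookup]
  | cons hd t ih =>
    obtain ⟨k0, w⟩ := hd
    by_cases hk : k0 = k
    · simp [pvLookup, hk] at h
    · simp only [pvLookup, hk, if_neg hk, List.cons_append] at h ⊢
      exact ih h

theorem pvLookup_append_other {β : Type} (l : List (String × β)) (k k' : String) (v : β)
    (h : k' ≠ k) : pvLookup (l ++ [(k, v)]) k' = pvLookup l k' := by
  induction l with
  | nil => simp [pvLookup, Ne.symm h]
  | cons hd t ih =>
    obtain ⟨k0, w⟩ := hd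
    by_cases hk : k0 = k' <;> simp [pvLookup, hk, ih]

theorem pvLookup_some_mem {β : Type} (l : List (String × β)) (k : String) (v : β)
    (h : pvLookup l k = some v) : (k, v) ∈ l := by
  induction l with
  | nil => simp [pvLookup] at h
  | cons hd t ih =>
    obtain ⟨k0, w⟩ := hd
    by_cases hk : k0 = k
    · subst hk
      simp [pvLookup] at h
      simp [h]
    · simp only [pvLookup, if_neg hk] at h
      exact List.mem_cons_of_mem _ (ih h)

theorem mkObj_congr (g g' : String → String → List String) (ix : List (String × List String))
    (h : ∀ sa ∈ ix, ∀ x ∈ sa.2, g sa.1 x = g' sa.1 x) : mkObj g ix = mkObj g' ix := by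
  induction ix with
  | nil => rfl
  | cons hd t ih =>
    simp only [mkObj, List.map_cons, List.cons.injEq]
    constructor
    · have := fun x hx => h hd (by simp) x hx
      simp only [Prod.mk.injEq, true_and]
      exact List.map_congr_left (fun x hx => by rw [this x hx])
    · exact ih (fun sa hsa x hx => h sa (List.mem_cons_of_mem _ hsa) x hx)

theorem pvLookup_mkObj (g : String → String → List String) (ix : List (String × List String)) (t : String) :
    pvLookup (mkObj g ix) t = (pvLookup ix t).map (fun l => l.map (fun a => (a, g t a))) := by
  induction ix with
  | nil => rfl
  | cons hd t' ih =>
    obtain ⟨s, l⟩ := hd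
    by_cases hs : s = t
    · subst hs; simp [mkObj, pvLookup]
    · simp only [mkObj, List.map_cons, pvLookup, if_neg hs]
      exact ih

theorem mkObj_cons (g : String → String → List String) (s : String) (l : List String)
    (rest : List (String × List String)) :
    mkObj g ((s, l) :: rest) = (s, l.map (fun a => (a, g s a))) :: mkObj g rest := rfl

theorem pvModify_cons_pos {β : Type} (k : String) (v : β) (t : List (String × β)) (f : β → β) :
    pvModify ((k, v) :: t) k f = (k, f v) :: t := by simp [pvModify]

theorem pvModify_cons_neg {β : Type} (k' : String) (v : β) (t : List (String × β)) (k : String)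
    (f : β → β) (h : k' ≠ k) : pvModify ((k', v) :: t) k f = (k', v) :: pvModify t k f := by
  simp [pvModify, h]

-- ONE app of A's inner loop commutes with the decoration
theorem pv_single (ix : List (String × List String)) (g : String → String → List String)
    (t a ch : String) (hgood : GoodIx ix)
    (hfresh : a ∉ ixGet ix t → g t a = []) :
    pvModify (mkObj g ix) t (pvAStepApp ch a)
      = mkObj (fun s x => if s = t ∧ x = a then (if ch ∈ g t a then g t a else g t a ++ [ch]) else g s x)
          (pvModify ix t (fun l => if a ∈ l then l else l ++ [a])) := by
  induction ix with
  | nil => simp [mkObj, pvModify]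
  | cons hd rest ih =>
    obtain ⟨s, l⟩ := hd
    obtain ⟨hknd, hinner⟩ := hgood
    simp only [List.map_cons, List.nodup_cons] at hknd
    have hlnd : l.Nodup := hinner (s, l) (by simp)
    by_cases hs : s = t
    · subst hs
      have hget : ixGet ((s, l) :: rest) s = l := by simp [ixGet, pvLookup]
      rw [mkObj_cons, pvModify_cons_pos, pvModify_cons_pos, mkObj_cons, List.cons.injEq]
      refine ⟨?_, ?_⟩
      · -- head entry
        by_cases ha : a ∈ l
        · have hsome : (pvLookup (l.map (fun x => (x, g s x))) a).isSome = true := by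
            rw [pvLookup_map_fst]; simp [ha]
          rw [pvAStepApp, if_neg (by simp [hsome]), if_pos ha]
          rw [pvModify_map_fst _ _ _ _ hlnd]
          apply congrArg (Prod.mk s)
          apply List.map_congr_left
          intro x hx
          by_cases hxa : x = a <;> simp [hxa]
        · have hnone : (pvLookup (l.map (fun x => (x, g s x))) a).isSome = false := by
            rw [pvLookup_map_fst]; simp [ha]
          have hga : g s a = [] := hfresh (by rw [hget]; exact ha)
          rw [pvAStepApp, if_pos (by simp [hnone]), if_neg ha]
          apply congrArg (Prod.mk s)
          rw [List.map_append]
          apply congrArg₂ (· ++ ·)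
          · apply List.map_congr_left
            intro x hx
            have : x ≠ a := fun he => ha (he ▸ hx)
            simp [this]
          · simp [hga]
      · -- tail: gU agrees with g away from key s
        exact mkObj_congr _ _ rest (fun sa hsa x hx => by
          have hne : sa.1 ≠ s := fun he => hknd.1 (he ▸ (List.mem_map_of_mem (f := fun sa => sa.1) hsa))
          simp [hne])
    · -- head key ≠ t: skip, recurse
      rw [mkObj_cons, pvModify_cons_neg _ _ _ _ _ hs, pvModify_cons_neg _ _ _ _ _ hs,
        mkObj_cons, List.cons.injEq]
      refine ⟨?_, ?_⟩
      · apply congrArg (Prod.mk s)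
        apply List.map_congr_left
        intro x hx
        simp [hs]
      · have hfresh' : a ∉ ixGet rest t → g t a = [] := by
          intro h
          apply hfresh
          simpa [ixGet, pvLookup, hs] using h
        exact ih ⟨hknd.2, fun sa hsa => hinner sa (List.mem_cons_of_mem _ hsa)⟩ hfresh'

theorem pvLookup_modify_self {β : Type} (l : List (String × β)) (k : String) (f : β → β) :
    pvLookup (pvModify l k f) k = (pvLookup l k).map f := by
  induction l with
  | nil => rfl
  | cons hd tl ih =>
    obtain ⟨k0, v⟩ := hd
    by_cases hk : k0 = k
    · subst hk; rw [pvModify_cons_pos, pvLookup, if_pos rfl, pvLookup, if_pos rfl]; rfl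
    · rw [pvModify_cons_neg _ _ _ _ _ hk, pvLookup, if_neg hk, pvLookup, if_neg hk, ih]

-- A's inner loop over the apps of one (status, apps) pair
theorem pv_inner (apps : List (String × List String)) (ix : List (String × List String))
    (g : String → String → List String) (t ch : String) (hgood : GoodIx ix)
    (hsome : (pvLookup ix t).isSome = true)
    (hfresh : ∀ x, x ∉ ixGet ix t → g t x = []) :
    apps.foldl (fun o ap => pvModify o t (pvAStepApp ch ap.1)) (mkObj g ix)
      = mkObj (fun s x => if s = t ∧ x ∈ apps.map (fun ap => ap.1) then (if ch ∈ g t x then g t x else g t x ++ [ch]) else g s x)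
          (apps.foldl (fun j ap => pvModify j t (fun l => if ap.1 ∈ l then l else l ++ [ap.1])) ix) := by
  induction apps generalizing ix g with
  | nil =>
    simp only [List.foldl_nil]
    exact mkObj_congr _ _ ix (fun sa hsa x hx => by simp)
  | cons ap rest ih =>
    simp only [List.foldl_cons]
    rw [pv_single ix g t ap.1 ch hgood (hfresh ap.1)]
    have hget' : ixGet (pvModify ix t (fun l => if ap.1 ∈ l then l else l ++ [ap.1])) t
        = (fun l => if ap.1 ∈ l then l else l ++ [ap.1]) (ixGet ix t) := by
      obtain ⟨w, hw⟩ := Option.isSome_iff_exists.mp hsome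
      simp [ixGet, pvLookup_modify_self, hw]
    have hgood' : GoodIx (pvModify ix t (fun l => if ap.1 ∈ l then l else l ++ [ap.1])) := by
      obtain ⟨hk, hi⟩ := hgood
      refine ⟨by rw [pvModify_keys]; exact hk, ?_⟩
      intro sa hsa
      rcases pvModify_mem _ _ _ _ hsa with h | ⟨v, hv, he⟩
      · exact hi sa h
      · subst he
        by_cases hmem : ap.1 ∈ v
        · simpa [hmem] using hi (t, v) hv
        · simpa [hmem] using List.Nodup.append (hi (t, v) hv) (by simp) (by simp [hmem])
    have hsome' : (pvLookup (pvModify ix t (fun l => if ap.1 ∈ l then l else l ++ [ap.1])) t).isSome = true := by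
      rw [pvLookup_modify_self]
      simpa using hsome
    have hfresh' : ∀ x, x ∉ ixGet (pvModify ix t (fun l => if ap.1 ∈ l then l else l ++ [ap.1])) t →
        (fun s x => if s = t ∧ x = ap.1 then (if ch ∈ g t ap.1 then g t ap.1 else g t ap.1 ++ [ch]) else g s x) t x = [] := by
      intro x hx
      rw [hget'] at hx
      have hx1 : x ≠ ap.1 := by
        intro he; subst he
        by_cases hm : ap.1 ∈ ixGet ix t
        · exact hx (by simp [hm])
        · exact hx (by simp [hm])
      have hx2 : x ∉ ixGet ix t := by
        intro hm
        apply hx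
        by_cases hcase : ap.1 ∈ ixGet ix t <;> simp [hcase, hm]
      simp [hx1, hfresh x hx2]
    rw [ih _ _ hgood' hsome' hfresh']
    congr 1
    funext s x
    by_cases hst : s = t
    · subst hst
      by_cases hxa : x = ap.1
      · have hch : ch ∈ (if ch ∈ g s ap.1 then g s ap.1 else g s ap.1 ++ [ch]) := by
          by_cases hc : ch ∈ g s ap.1 <;> simp [hc]
        by_cases hr : x ∈ rest.map (fun ap => ap.1) <;> simp [hr, hxa, hch]
      · by_cases hr : x ∈ rest.map (fun ap => ap.1) <;>
          simp [hr, hxa]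
    · simp [hst]

theorem self_mem_addIf (l : List String) (a : String) : a ∈ (if a ∈ l then l else l ++ [a]) := by
  by_cases h : a ∈ l <;> simp [h]

theorem mem_addIf (l : List String) (a x : String) (h : x ∈ l) : x ∈ (if a ∈ l then l else l ++ [a]) := by
  by_cases ha : a ∈ l <;> simp [ha, h]

theorem foldl_addIf_mono (apps : List (String × List String)) (l : List String) (x : String)
    (h : x ∈ l) : x ∈ apps.foldl (fun l ap => if ap.1 ∈ l then l else l ++ [ap.1]) l := by
  induction apps generalizing l with
  | nil => exact h
  | cons ap rest ih => exact ih _ (mem_addIf _ _ _ h)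

theorem foldl_addIf_complete (apps : List (String × List String)) (l : List String) (x : String)
    (h : x ∈ apps.map (fun ap => ap.1)) :
    x ∈ apps.foldl (fun l ap => if ap.1 ∈ l then l else l ++ [ap.1]) l := by
  induction apps generalizing l with
  | nil => simp at h
  | cons ap rest ih =>
    rcases List.mem_map.mp h with ⟨ap', hap', he⟩
    rcases List.mem_cons.mp hap' with h1 | h1
    · subst h1
      rw [List.foldl_cons]
      exact foldl_addIf_mono _ _ _ (he ▸ self_mem_addIf l ap'.1)
    · rw [List.foldl_cons]
      exact ih _ (List.mem_map.mpr ⟨ap', h1, he⟩)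

theorem nodup_addIf (l : List String) (a : String) (h : l.Nodup) :
    (if a ∈ l then l else l ++ [a]).Nodup := by
  by_cases ha : a ∈ l
  · simpa [ha]
  · simpa [ha] using List.Nodup.append h (by simp) (by simp [ha])

-- registration step: 'if status not in ix: ix[status] = []'
theorem ixGet_register (j : List (String × List String)) (t t' : String) :
    ixGet (if (pvLookup j t).isSome = false then j ++ [(t, [])] else j) t' = ixGet j t' := by
  by_cases hjs : (pvLookup j t).isSome = false
  · rw [if_pos hjs]
    by_cases ht : t' = t
    · subst ht
      rw [ixGet, pvLookup_append_right _ _ _ hjs, ixGet]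
      cases hh : pvLookup j t'
      · rfl
      · rw [hh] at hjs; simp at hjs
    · rw [ixGet, pvLookup_append_other _ _ _ _ ht, ixGet]
  · rw [if_neg hjs]

theorem lookup_register_isSome (j : List (String × List String)) (t : String) :
    (pvLookup (if (pvLookup j t).isSome = false then j ++ [(t, [])] else j) t).isSome = true := by
  by_cases hjs : (pvLookup j t).isSome = false
  · rw [if_pos hjs, pvLookup_append_right _ _ _ hjs]; rfl
  · rw [if_neg hjs]
    cases hh : pvLookup j t with
    | none => exact absurd (by rw [hh]; rfl) hjs
    | some w => rfl

theorem goodIx_register (j : List (String × List String)) (t : String) (h : GoodIx j) :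
    GoodIx (if (pvLookup j t).isSome = false then j ++ [(t, [])] else j) := by
  by_cases hjs : (pvLookup j t).isSome = false
  · rw [if_pos hjs]
    have ht : t ∉ j.map (fun sa => sa.1) := by
      intro hm
      rw [(pvLookup_isSome j t).mpr hm] at hjs
      simp at hjs
    refine ⟨?_, ?_⟩
    · simpa using List.Nodup.append h.1 (by simp) (by simpa using ht)
    · intro sa hsa
      rcases List.mem_append.mp hsa with h1 | h1
      · exact h.2 sa h1
      · simp at h1; subst h1; simp
  · rw [if_neg hjs]; exact h

theorem goodIx_modify_addIf (j : List (String × List String)) (t a : String) (h : GoodIx j) :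
    GoodIx (pvModify j t (fun l => if a ∈ l then l else l ++ [a])) := by
  refine ⟨by rw [pvModify_keys]; exact h.1, ?_⟩
  intro sa hsa
  rcases pvModify_mem _ _ _ _ hsa with h1 | ⟨v, hv, he⟩
  · exact h.2 sa h1
  · subst he
    exact nodup_addIf _ _ (h.2 (t, v) hv)

theorem goodIx_foldl_addIf (apps : List (String × List String)) (j : List (String × List String))
    (t : String) (h : GoodIx j) :
    GoodIx (apps.foldl (fun j ap => pvModify j t (fun l => if ap.1 ∈ l then l else l ++ [ap.1])) j) := by
  induction apps generalizing j with
  | nil => exact h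
  | cons ap rest ih => exact ih _ (goodIx_modify_addIf _ _ _ h)

theorem lookup_foldl_addIf_other (apps : List (String × List String)) (j : List (String × List String))
    (t t' : String) (h : t' ≠ t) :
    pvLookup (apps.foldl (fun j ap => pvModify j t (fun l => if ap.1 ∈ l then l else l ++ [ap.1])) j) t'
      = pvLookup j t' := by
  induction apps generalizing j with
  | nil => rfl
  | cons ap rest ih => rw [List.foldl_cons, ih, pvLookup_modify_other _ _ _ _ h]

theorem ixGet_foldl_addIf_self (apps : List (String × List String)) (j : List (String × List String))
    (t : String) (hsome : (pvLookup j t).isSome = true) :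
    ixGet (apps.foldl (fun j ap => pvModify j t (fun l => if ap.1 ∈ l then l else l ++ [ap.1])) j) t
      = apps.foldl (fun l ap => if ap.1 ∈ l then l else l ++ [ap.1]) (ixGet j t) := by
  induction apps generalizing j with
  | nil => rfl
  | cons ap rest ih =>
    obtain ⟨w, hw⟩ := Option.isSome_iff_exists.mp hsome
    rw [List.foldl_cons, List.foldl_cons, ih _ (by rw [pvLookup_modify_self, hw]; rfl)]
    congr 1
    simp [ixGet, pvLookup_modify_self, hw]

theorem goodIx_collect (j : List (String × List String)) (ta : String × List (String × List String))
    (h : GoodIx j) : GoodIx (pvCollectStatus j ta) :=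
  goodIx_foldl_addIf _ _ _ (goodIx_register _ _ h)

theorem ixGet_collect_other (j : List (String × List String)) (ta : String × List (String × List String))
    (t' : String) (h : t' ≠ ta.1) : ixGet (pvCollectStatus j ta) t' = ixGet j t' := by
  rw [pvCollectStatus, ixGet, lookup_foldl_addIf_other _ _ _ _ h, ← ixGet]
  exact ixGet_register _ _ _

theorem ixGet_collect_mono (j : List (String × List String)) (ta : String × List (String × List String))
    (t x : String) (h : x ∈ ixGet j t) : x ∈ ixGet (pvCollectStatus j ta) t := by
  by_cases ht : t = ta.1
  · subst ht
    rw [pvCollectStatus, ixGet_foldl_addIf_self _ _ _ (lookup_register_isSome _ _)]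
    exact foldl_addIf_mono _ _ _ (by rw [ixGet_register]; exact h)
  · rw [ixGet_collect_other _ _ _ ht]; exact h

theorem ixGet_collect_complete (j : List (String × List String)) (ta : String × List (String × List String))
    (x : String) (h : x ∈ ta.2.map (fun ap => ap.1)) : x ∈ ixGet (pvCollectStatus j ta) ta.1 := by
  rw [pvCollectStatus, ixGet_foldl_addIf_self _ _ _ (lookup_register_isSome _ _)]
  exact foldl_addIf_complete _ _ _ h

-- A's middle loop over one channel's (status, apps) pairs
theorem pv_outer (L : List (String × List (String × List String))) (j : List (String × List String))
    (g : String → String → List String) (ch : String) (hgood : GoodIx j)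
    (hfresh : Fresh g j) :
    L.foldl (fun o ta => pvAStepType ch o ta.1 ta.2) (mkObj g j)
      = mkObj (fun s x => if pvHit L s x then (if ch ∈ g s x then g s x else g s x ++ [ch]) else g s x)
          (L.foldl pvCollectStatus j) := by
  induction L generalizing j g with
  | nil =>
    simp only [List.foldl_nil]
    exact mkObj_congr _ _ j (fun sa hsa x hx => by simp [pvHit])
  | cons ta rest ih =>
    simp only [List.foldl_cons]
    have hlk : (pvLookup (mkObj g j) ta.1).isSome = (pvLookup j ta.1).isSome := by
      rw [pvLookup_mkObj]; cases pvLookup j ta.1 <;> rfl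
    have hstep : pvAStepType ch (mkObj g j) ta.1 ta.2
        = ta.2.foldl (fun o ap => pvModify o ta.1 (pvAStepApp ch ap.1))
            (mkObj g (if (pvLookup j ta.1).isSome = false then j ++ [(ta.1, [])] else j)) := by
      rw [pvAStepType, hlk]
      cases hjs : (pvLookup j ta.1).isSome <;> simp [hjs, mkObj]
    rw [hstep]
    have hgood1 : GoodIx (if (pvLookup j ta.1).isSome = false then j ++ [(ta.1, [])] else j) :=
      goodIx_register _ _ hgood
    have hsome1 := lookup_register_isSome j ta.1
    have hfresh1 : ∀ x, x ∉ ixGet (if (pvLookup j ta.1).isSome = false then j ++ [(ta.1, [])] else j) ta.1 → g ta.1 x = [] := by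
      intro x hx
      exact hfresh ta.1 x (by rwa [ixGet_register] at hx)
    rw [pv_inner ta.2 _ g ta.1 ch hgood1 hsome1 hfresh1]
    have hcoll : (ta.2.foldl (fun j ap => pvModify j ta.1 (fun l => if ap.1 ∈ l then l else l ++ [ap.1]))
        (if (pvLookup j ta.1).isSome = false then j ++ [(ta.1, [])] else j)) = pvCollectStatus j ta := rfl
    rw [hcoll]
    have hgood2 : GoodIx (pvCollectStatus j ta) := goodIx_collect _ _ hgood
    have hfresh2 : Fresh (fun s x => if s = ta.1 ∧ x ∈ ta.2.map (fun ap => ap.1) then (if ch ∈ g ta.1 x then g ta.1 x else g ta.1 x ++ [ch]) else g s x) (pvCollectStatus j ta) := by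
      intro t' x hx
      change (if t' = ta.1 ∧ x ∈ List.map (fun ap => ap.1) ta.2 then if ch ∈ g ta.1 x then g ta.1 x else g ta.1 x ++ [ch] else g t' x) = []
      by_cases hcond : t' = ta.1 ∧ x ∈ List.map (fun ap => ap.1) ta.2
      · exact absurd (hcond.1 ▸ ixGet_collect_complete j ta x hcond.2) hx
      · rw [if_neg hcond]
        exact hfresh t' x (fun hm => hx (ixGet_collect_mono _ _ _ _ hm))
    rw [ih _ _ hgood2 hfresh2]
    congr 1
    funext s x
    have hhit : pvHit (ta :: rest) s x = ((decide (ta.1 = s ∧ ∃ ap ∈ ta.2, ap.1 = x)) || pvHit rest s x) := by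
      simp [pvHit]
    rw [hhit]
    by_cases hta : ta.1 = s ∧ x ∈ ta.2.map (fun ap => ap.1)
    · have hcond : s = ta.1 ∧ x ∈ ta.2.map (fun ap => ap.1) := ⟨hta.1.symm, hta.2⟩
      have hdec : (decide (ta.1 = s ∧ ∃ ap ∈ ta.2, ap.1 = x)) = true := by
        rcases List.mem_map.mp hta.2 with ⟨ap, hap, he⟩
        exact decide_eq_true ⟨hta.1, ap, hap, he⟩
      have hch : ch ∈ (if ch ∈ g ta.1 x then g ta.1 x else g ta.1 x ++ [ch]) := by
        by_cases hc : ch ∈ g ta.1 x <;> simp [hc]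
      rw [hdec, if_pos hcond, hcond.1]
      by_cases hr : pvHit rest ta.1 x <;> simp [hr, hch]
    · have hdec : (decide (ta.1 = s ∧ ∃ ap ∈ ta.2, ap.1 = x)) = false := by
        apply decide_eq_false
        rintro ⟨h1, ap, hap, he⟩
        exact hta ⟨h1, List.mem_map.mpr ⟨ap, hap, he⟩⟩
      have hcond : ¬ (s = ta.1 ∧ x ∈ ta.2.map (fun ap => ap.1)) := fun h => hta ⟨h.1.symm, h.2⟩
      rw [hdec]
      simp only [Bool.false_or]
      rw [if_neg hcond]

theorem goodIx_preserved (L : List (String × List (String × List String))) (j : List (String × List String))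
    (hgood : GoodIx j) : GoodIx (L.foldl pvCollectStatus j) := by
  induction L generalizing j with
  | nil => exact hgood
  | cons ta rest ih => exact ih _ (goodIx_collect _ _ hgood)

theorem ixGet_mono_collect (L : List (String × List (String × List String))) (j : List (String × List String))
    (t x : String) (h : x ∈ ixGet j t) : x ∈ ixGet (L.foldl pvCollectStatus j) t := by
  induction L generalizing j with
  | nil => exact h
  | cons ta rest ih => exact ih _ (ixGet_collect_mono _ _ _ _ h)

theorem ixGet_complete_collect (L : List (String × List (String × List String))) (j : List (String × List String))
    (t x : String) (ta : String × List (String × List String)) (hta : ta ∈ L) (ht : ta.1 = t)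
    (hx : x ∈ ta.2.map (fun ap => ap.1)) : x ∈ ixGet (L.foldl pvCollectStatus j) t := by
  induction L generalizing j with
  | nil => simp at hta
  | cons hd rest ih =>
    rcases List.mem_cons.mp hta with h1 | h1
    · subst h1
      exact ixGet_mono_collect rest _ _ _ (ht ▸ ixGet_collect_complete j ta x hx)
    · exact ih _ h1

theorem pvChannelsFor_sub (p : List (String × List (String × List (String × List String)))) (s x : String) :
    pvChannelsFor p s x ⊆ p.map (fun ct => ct.1) := by
  intro y hy
  rcases List.mem_map.mp hy with ⟨ct, hct, he⟩
  exact List.mem_map.mpr ⟨ct, List.mem_of_mem_filter hct, he⟩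

theorem pvChannelsFor_append (p : List (String × List (String × List (String × List String))))
    (c : String × List (String × List (String × List String))) (s x : String) :
    pvChannelsFor (p ++ [c]) s x = pvChannelsFor p s x ++ (if pvHitC c.2 s x then [c.1] else []) := by
  rw [pvChannelsFor, pvChannelsFor, List.filter_append, List.map_append]
  congr 1
  rw [List.filter_cons, List.filter_nil]
  change (if pvHitC c.2 s x = true then [c] else []).map (fun ct => ct.1) = _
  by_cases hh : pvHitC c.2 s x = true <;> simp [hh]

theorem pvHit_eq_hitC (L : List (String × List (String × List String))) (s x : String)
    (hnd : (L.map (fun ta => ta.1)).Nodup) : pvHit L s x = pvHitC L s x := by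
  induction L with
  | nil => rfl
  | cons ta rest ih =>
    simp only [List.map_cons, List.nodup_cons] at hnd
    obtain ⟨ta1, ta2⟩ := ta
    by_cases hts : ta1 = s
    · subst hts
      have hrest : pvHit rest ta1 x = false := by
        cases hr : pvHit rest ta1 x
        · rfl
        · rcases List.any_eq_true.mp hr with ⟨ta', hta', hd⟩
          rcases of_decide_eq_true hd with ⟨h1, _⟩
          exact absurd (h1 ▸ List.mem_map_of_mem (f := fun ta => ta.1) hta') hnd.1
      rw [pvHit, List.any_cons, ← pvHit, hrest, Bool.or_false, pvHitC, pvLookup, if_pos rfl]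
      have hm : (match some ta2 with
          | some apps => (pvLookup apps x).isSome
          | none => false) = (pvLookup ta2 x).isSome := rfl
      rw [hm]
      cases hk : (pvLookup ta2 x).isSome
      · apply decide_eq_false
        rintro ⟨-, ap, hap, he⟩
        have : x ∈ ta2.map (fun p => p.1) := List.mem_map.mpr ⟨ap, hap, he⟩
        rw [(pvLookup_isSome ta2 x).mpr this] at hk
        simp at hk
      · apply decide_eq_true
        rcases List.mem_map.mp ((pvLookup_isSome ta2 x).mp hk) with ⟨ap, hap, he⟩
        exact ⟨rfl, ap, hap, he⟩
    · rw [pvHit, List.any_cons, ← pvHit, ih hnd.2]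
      have h0 : (decide ((ta1, ta2).1 = s ∧ ∃ ap ∈ (ta1, ta2).2, ap.1 = x)) = false :=
        decide_eq_false (fun h => hts h.1)
      rw [h0, Bool.false_or]
      have h1 : pvLookup ((ta1, ta2) :: rest) s = pvLookup rest s := by
        simp [pvLookup, hts]
      rw [pvHitC, pvHitC, h1]

theorem fresh_step (p : List (String × List (String × List (String × List String))))
    (c : String × List (String × List (String × List String)))
    (hfresh : Fresh (fun s x => pvChannelsFor p s x) (idxOf p)) :
    Fresh (fun s x => pvChannelsFor (p ++ [c]) s x) (idxOf (p ++ [c])) := by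
  intro t x hx
  have hidx : idxOf (p ++ [c]) = c.2.foldl pvCollectStatus (idxOf p) := by
    rw [idxOf, List.foldl_append]; rfl
  rw [hidx] at hx
  have h1 : pvChannelsFor p t x = [] := by
    refine hfresh t x (fun hm => hx (ixGet_mono_collect _ _ _ _ hm))
  have h2 : pvHitC c.2 t x = false := by
    cases hh : pvHitC c.2 t x
    · rfl
    · exfalso
      rw [pvHitC] at hh
      cases hl : pvLookup c.2 t with
      | none => rw [hl] at hh; simp at hh
      | some apps =>
        rw [hl] at hh
        have hmem : (t, apps) ∈ c.2 := pvLookup_some_mem _ _ _ hl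
        rcases List.mem_map.mp ((pvLookup_isSome apps x).mp hh) with ⟨ap, hap, he⟩
        exact hx (ixGet_complete_collect c.2 (idxOf p) t x (t, apps) hmem rfl
          (List.mem_map.mpr ⟨ap, hap, he⟩))
  show pvChannelsFor (p ++ [c]) t x = []
  rw [pvChannelsFor_append, h1, h2]
  rfl

theorem goodIx_foldl_channels (p : List (String × List (String × List (String × List String))))
    (j : List (String × List String)) (h : GoodIx j) :
    GoodIx (p.foldl (fun j ct => ct.2.foldl pvCollectStatus j) j) := by
  induction p generalizing j with
  | nil => exact h
  | cons ct rest ih => exact ih _ (goodIx_preserved ct.2 j h)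

theorem goodIx_idxOf (p : List (String × List (String × List (String × List String)))) : GoodIx (idxOf p) :=
  goodIx_foldl_channels p [] ⟨List.nodup_nil, by simp⟩

theorem fresh_idxOf (p : List (String × List (String × List (String × List String)))) :
    Fresh (fun s x => pvChannelsFor p s x) (idxOf p) := by
  induction p using List.reverseRecOn with
  | nil => intro t x _; rfl
  | append_singleton p c ih => exact fresh_step p c ih

theorem pv_main (p : List (String × List (String × List (String × List String))))
    (hpre : Pre_get_app_channel_for_stores p) :
    get_app_channel_for_stores p = mkObj (fun s x => pvChannelsFor p s x) (idxOf p) := by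
  induction p using List.reverseRecOn with
  | nil => rfl
  | append_singleton p c ih =>
    have hkeys : (p.map (fun ct => ct.1)).Nodup ∧ c.1 ∉ p.map (fun ct => ct.1) := by
      have := hpre.1
      rw [List.map_append] at this
      rcases List.nodup_append.mp this with ⟨h1, h2, h3⟩
      exact ⟨h1, fun hm => by simpa using h3 c.1 hm⟩
    have hprep : Pre_get_app_channel_for_stores p :=
      ⟨hkeys.1, fun ct hct => hpre.2 ct (List.mem_append_left _ hct)⟩
    have hcnd : (c.2.map (fun ta => ta.1)).Nodup :=
      hpre.2 c (List.mem_append_right _ (by simp))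
    have hstep : get_app_channel_for_stores (p ++ [c])
        = c.2.foldl (fun o ta => pvAStepType c.1 o ta.1 ta.2) (get_app_channel_for_stores p) := by
      rw [get_app_channel_for_stores, get_app_channel_for_stores, List.foldl_append,
        List.foldl_cons, List.foldl_nil]
    rw [hstep, ih hprep,
      pv_outer c.2 (idxOf p) (fun s x => pvChannelsFor p s x) c.1 (goodIx_idxOf p) (fresh_idxOf p)]
    have hidx : idxOf (p ++ [c]) = c.2.foldl pvCollectStatus (idxOf p) := by
      rw [idxOf, idxOf, List.foldl_append, List.foldl_cons, List.foldl_nil]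
    rw [← hidx]
    congr 1
    funext s x
    have hsub := pvChannelsFor_sub p s x
    have hc1 : c.1 ∉ pvChannelsFor p s x := fun hm => hkeys.2 (hsub hm)
    rw [pvHit_eq_hitC _ _ _ hcnd, pvChannelsFor_append]
    cases hh : pvHitC c.2 s x
    · simp
    · simp [hc1]

-- ===== VERDICT (by name: the statement is the Claim_ definition above) =====
theorem get_app_channel_for_stores_spec : Claim_equal_get_app_channel_for_stores := by
  intro stores _ hpre
  unfold Spec_get_app_channel_for_stores get_app_channel_for_stores_alt
  rw [pv_main stores hpre]
  rfl
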